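-- pv_equiv track=rewrite | github.com/juan15377/TimeTables | src/Logic/schedule_printer/schedulegrid.py | lineas_fila
-- ===== SOURCE A (Python) =====
-- def romper_vector_partes(vector):
--     lista = []
--     elemento = []
--     switch = False
--
--     for i, val in enumerate(vector):
--         if val:
--             elemento.append(i + 1)
--             switch = True
--             continue
--
--         if switch:
--             lista.append(elemento)
--             elemento = []
--             switch = False
--
--     if elemento:
--         lista.append(elemento)
--
--     return lista
--
-- def lineas_fila(vector_bool):
--     valores = romper_vector_partes(vector_bool)
--     cadena = ""
--
--     for valor in valores:
--         primero = valor[0]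
--         ultimo = valor[-1]
--         cadena += f" \\cline{{{primero}-{ultimo}}}"
--
--     return cadena
-- ===== SOURCE B (Python) =====
-- def lineas_fila(vector_bool):
--     idxs = [i + 1 for i, val in enumerate(vector_bool) if val]
--     partes = []
--     start = None
--     prev = 0
--     for j in idxs:
--         if start is None:
--             start = j
--         elif j != prev + 1:
--             partes.append(f" \\cline{{{start}-{prev}}}")
--             start = j
--         prev = j
--     if start is not None:
--         partes.append(f" \\cline{{{start}-{prev}}}")
--     return "".join(partes)
-- ===== Notes on version B (the rewrite author's own statement) =====
-- stated objective: simpler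
-- what changed: Instead of segmenting the vector into explicit run lists with a switch flag and then rendering each run's first/last element, B extracts the 1-based truthy indices in one comprehension and emits a \cline at each gap while tracking only the current run's start and previous index, joining the pieces at the end.
import Mathlib
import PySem

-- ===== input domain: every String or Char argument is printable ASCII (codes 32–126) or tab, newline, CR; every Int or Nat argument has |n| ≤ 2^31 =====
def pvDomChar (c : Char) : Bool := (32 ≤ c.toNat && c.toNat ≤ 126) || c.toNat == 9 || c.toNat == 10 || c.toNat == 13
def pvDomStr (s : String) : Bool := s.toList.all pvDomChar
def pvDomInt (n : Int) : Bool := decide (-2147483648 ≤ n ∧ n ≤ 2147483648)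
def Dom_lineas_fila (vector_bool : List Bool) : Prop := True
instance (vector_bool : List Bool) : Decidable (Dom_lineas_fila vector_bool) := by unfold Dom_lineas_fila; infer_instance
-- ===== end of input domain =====

-- B replaces A's run-list segmentation (switch flag + list of runs) by a single pass over the
-- 1-based truthy indices that emits a \cline at each gap, tracking only the run start; objective: simpler.

-- ===== PORT A =====
-- the enumerate loop of romper_vector_partes, state (lista, elemento, switch), index i from 0
def romper_go : List Bool → Int → List (List Int) → List Int → Bool → List (List Int) × List Int × Bool
  | [], _, lista, elemento, switch => (lista, elemento, switch)
  | val :: t, i, lista, elemento, switch =>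
    if val then romper_go t (i + 1) lista (elemento ++ [i + 1]) true
    else if switch then romper_go t (i + 1) (lista ++ [elemento]) [] false
    else romper_go t (i + 1) lista elemento switch

def romper_vector_partes (vector : List Bool) : List (List Int) :=
  let st := romper_go vector 0 [] [] false
  if st.2.1 ≠ [] then st.1 ++ [st.2.1] else st.1

def lineas_fila (vector_bool : List Bool) : String :=
  let valores := romper_vector_partes vector_bool
  -- valor[0] / valor[-1]: every element of valores is nonempty, so headD/getLastD are exact here
  valores.foldl (fun cadena valor =>
    cadena ++ " \\cline{" ++ PySem.Int.toStr (valor.headD 0) ++ "-" ++ PySem.Int.toStr (valor.getLastD 0) ++ "}") ""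

-- ===== PORT B =====
-- the comprehension [i+1 for i, val in enumerate(vector_bool) if val]
def lineas_fila_alt_idxs : List Bool → Int → List Int
  | [], _ => []
  | val :: t, i => if val then (i + 1) :: lineas_fila_alt_idxs t (i + 1) else lineas_fila_alt_idxs t (i + 1)

-- the loop over idxs, state (partes, start, prev)
def lineas_fila_alt_go : List Int → List String → Option Int → Int → List String × Option Int × Int
  | [], partes, start, prev => (partes, start, prev)
  | j :: rest, partes, none, _ => lineas_fila_alt_go rest partes (some j) j
  | j :: rest, partes, some s, prev =>
    if j ≠ prev + 1 then
      lineas_fila_alt_go rest (partes ++ [" \\cline{" ++ PySem.Int.toStr s ++ "-" ++ PySem.Int.toStr prev ++ "}"]) (some j) j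
    else lineas_fila_alt_go rest partes (some s) j

def lineas_fila_alt (vector_bool : List Bool) : String :=
  let st := lineas_fila_alt_go (lineas_fila_alt_idxs vector_bool 0) [] none 0
  match st.2.1 with
  | none => String.join st.1
  | some start => String.join (st.1 ++ [" \\cline{" ++ PySem.Int.toStr start ++ "-" ++ PySem.Int.toStr st.2.2 ++ "}"])

-- ===== PRECONDITION & SPEC =====
def Spec_lineas_fila (vector_bool : List Bool) (out : String) : Prop := out = lineas_fila_alt vector_bool
instance (vector_bool : List Bool) (out : String) : Decidable (Spec_lineas_fila vector_bool out) := by unfold Spec_lineas_fila; infer_instance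

-- ===== CLAIM (what is proved, stated in full; the proofs are below) =====
def Claim_equal_lineas_fila : Prop := ∀ (vector_bool : List Bool), Dom_lineas_fila vector_bool → Spec_lineas_fila vector_bool (lineas_fila vector_bool)

-- ===== LEMMAS AND PROOFS =====

def render (s p : Int) : String := " \\cline{" ++ PySem.Int.toStr s ++ "-" ++ PySem.Int.toStr p ++ "}"

def renderL (L : List (List Int)) : String :=
  L.foldl (fun cadena valor => cadena ++ render (valor.headD 0) (valor.getLastD 0)) ""

-- bridge functions: A's scan, with the open run abstracted to (start, last)
mutual
def fC : List Bool → Int → String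
  | [], _ => ""
  | true :: t, n => fO t (n + 1) n n
  | false :: t, n => fC t (n + 1)

def fO : List Bool → Int → Int → Int → String
  | [], _, s, p => render s p
  | true :: t, n, s, _ => fO t (n + 1) s n
  | false :: t, n, s, p => render s p ++ fC t (n + 1)
end

-- bridge functions: B's scan over the truthy indices
mutual
def fBn : List Bool → Int → String
  | [], _ => ""
  | true :: t, n => fBs t (n + 1) n n
  | false :: t, n => fBn t (n + 1)

def fBs : List Bool → Int → Int → Int → String
  | [], _, s, p => render s p
  | true :: t, n, s, p => if n ≠ p + 1 then render s p ++ fBs t (n + 1) n n else fBs t (n + 1) s n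
  | false :: t, n, s, p => fBs t (n + 1) s p
end

theorem renderL_concat (L : List (List Int)) (x : List Int) :
    renderL (L ++ [x]) = renderL L ++ render (x.headD 0) (x.getLastD 0) := by
  simp [renderL, List.foldl_append]

theorem join_concat (L : List String) (x : String) :
    String.join (L ++ [x]) = String.join L ++ x := by
  simp [String.join, List.foldl_append]

theorem headD_concat {e : List Int} (h : e ≠ []) (x d : Int) : (e ++ [x]).headD d = e.headD d := by
  cases e with
  | nil => exact absurd rfl h
  | cons a t => rfl

def finishA (st : List (List Int) × List Int × Bool) : String :=
  renderL (if st.2.1 ≠ [] then st.1 ++ [st.2.1] else st.1)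

theorem lemA (v : List Bool) : ∀ (i : Int) (lista : List (List Int)),
    (finishA (romper_go v i lista [] false) = renderL lista ++ fC v (i + 1)) ∧
    (∀ e : List Int, e ≠ [] →
      finishA (romper_go v i lista e true) = renderL lista ++ fO v (i + 1) (e.headD 0) (e.getLastD 0)) := by
  induction v with
  | nil =>
    intro i lista
    refine ⟨by simp [romper_go, finishA, fC], fun e he => ?_⟩
    simp [romper_go, finishA, fO, he, renderL_concat]
  | cons val t ih =>
    intro i lista
    constructor
    · cases val with
      | true =>
        have := ((ih (i + 1) lista).2 [i + 1] (by simp))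
        simpa [romper_go, fC] using this
      | false =>
        have := (ih (i + 1) lista).1
        simpa [romper_go, fC] using this
    · intro e he
      cases val with
      | true =>
        have := ((ih (i + 1) lista).2 (e ++ [i + 1]) (by simp))
        rw [show romper_go (true :: t) i lista e true
            = romper_go t (i + 1) lista (e ++ [i + 1]) true from by simp [romper_go]]
        rw [this, headD_concat he, List.getLastD_concat]
        simp [fO]
      | false =>
        have := (ih (i + 1) (lista ++ [e])).1
        rw [show romper_go (false :: t) i lista e true
            = romper_go t (i + 1) (lista ++ [e]) [] false from by simp [romper_go]]
        rw [this, renderL_concat]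
        simp [fO, String.append_assoc]

def finishB (st : List String × Option Int × Int) : String :=
  match st.2.1 with
  | none => String.join st.1
  | some s => String.join (st.1 ++ [render s st.2.2])

theorem lemB (v : List Bool) : ∀ (i : Int) (partes : List String),
    (∀ prev : Int, finishB (lineas_fila_alt_go (lineas_fila_alt_idxs v i) partes none prev)
      = String.join partes ++ fBn v (i + 1)) ∧
    (∀ s p : Int, finishB (lineas_fila_alt_go (lineas_fila_alt_idxs v i) partes (some s) p)
      = String.join partes ++ fBs v (i + 1) s p) := by
  induction v with
  | nil =>
    intro i partes
    refine ⟨fun prev => by simp [lineas_fila_alt_idxs, lineas_fila_alt_go, finishB, fBn],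
      fun s p => by simp [lineas_fila_alt_idxs, lineas_fila_alt_go, finishB, fBs, join_concat, render]⟩
  | cons val t ih =>
    intro i partes
    constructor
    · intro prev
      cases val with
      | true =>
        have := (ih (i + 1) partes).2 (i + 1) (i + 1)
        simpa [lineas_fila_alt_idxs, lineas_fila_alt_go, fBn] using this
      | false =>
        have := (ih (i + 1) partes).1 prev
        simpa [lineas_fila_alt_idxs, lineas_fila_alt_go, fBn] using this
    · intro s p
      cases val with
      | true =>
        by_cases h : (i + 1 : Int) = p + 1
        · have := (ih (i + 1) partes).2 s (i + 1)
          simpa [lineas_fila_alt_idxs, lineas_fila_alt_go, fBs, h] using this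
        · have := (ih (i + 1) (partes ++ [render s p])).2 (i + 1) (i + 1)
          rw [show lineas_fila_alt_go (lineas_fila_alt_idxs (true :: t) i) partes (some s) p
              = lineas_fila_alt_go (lineas_fila_alt_idxs t (i + 1))
                  (partes ++ [" \\cline{" ++ PySem.Int.toStr s ++ "-" ++ PySem.Int.toStr p ++ "}"])
                  (some (i + 1)) (i + 1) from by simp [lineas_fila_alt_idxs, lineas_fila_alt_go, h]]
          rw [show (" \\cline{" ++ PySem.Int.toStr s ++ "-" ++ PySem.Int.toStr p ++ "}") = render s p from rfl]
          rw [this, join_concat]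
          simp [fBs, h, String.append_assoc]
      | false =>
        have := (ih (i + 1) partes).2 s p
        simpa [lineas_fila_alt_idxs, lineas_fila_alt_go, fBs] using this

theorem fBs_gap (v : List Bool) : ∀ (n s p : Int), p + 1 < n → fBs v n s p = render s p ++ fBn v n := by
  induction v with
  | nil => intro n s p _; simp [fBs, fBn]
  | cons val t ih =>
    intro n s p h
    cases val with
    | true => simp [fBs, fBn, show n ≠ p + 1 by omega]
    | false =>
      have := ih (n + 1) s p (by omega)
      simpa [fBs, fBn] using this

theorem middle (v : List Bool) : ∀ (n : Int),
    (fC v n = fBn v n) ∧ (∀ s : Int, fO v n s (n - 1) = fBs v n s (n - 1)) := by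
  induction v with
  | nil => intro n; exact ⟨rfl, fun s => rfl⟩
  | cons val t ih =>
    intro n
    constructor
    · cases val with
      | true =>
        have := (ih (n + 1)).2 n
        simpa [fC, fBn] using this
      | false =>
        have := (ih (n + 1)).1
        simpa [fC, fBn] using this
    · intro s
      cases val with
      | true =>
        have := (ih (n + 1)).2 s
        simpa [fO, fBs, show ¬ (n ≠ (n - 1) + 1) by omega] using this
      | false =>
        have h1 := fBs_gap t (n + 1) s (n - 1) (by omega)
        have h2 := (ih (n + 1)).1
        simp [fO, fBs, h1, h2]

-- ===== VERDICT (by name: the statement is the Claim_ definition above) =====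
theorem lineas_fila_spec : Claim_equal_lineas_fila := by
  intro v _
  unfold Spec_lineas_fila
  have ha : lineas_fila v = finishA (romper_go v 0 [] [] false) := by
    simp [lineas_fila, romper_vector_partes, finishA, renderL, render, String.append_assoc]
  have hb : lineas_fila_alt v = finishB (lineas_fila_alt_go (lineas_fila_alt_idxs v 0) [] none 0) := by
    simp [lineas_fila_alt, finishB, render]
  rw [ha, hb, (lemA v 0 []).1, (lemB v 0 []).1 0, (middle v (0 + 1)).1]
  simp [renderL, String.join]
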